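-- pv_equiv track=rewrite | github.com/romutchio/CipherBreaker | logic/decryptor.py | get_wordlists_pattern
-- ===== SOURCE A (Python) =====
-- def get_pattern(word):
--     """
--     Создание паттерна - пример '0123412356' для 'DUSTBUSTER'
--     """
--     next_num = 0
--     letter_nums = {}
--     word_mask = []
--     for letter in word:
--         if letter not in letter_nums:
--             letter_nums[letter] = str(next_num)
--             next_num += 1
--         word_mask.append(letter_nums[letter])
--     return ''.join(word_mask)
--
-- def get_wordlists_pattern(words):
--     """
--     Создание паттерна для всех слов в листе.
--     """
--     all_masks = {}
--     for word in words:
--         mask = get_pattern(word)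
--         if mask not in all_masks:
--             all_masks[mask] = [word]
--         else:
--             all_masks[mask].append(word)
--     return all_masks
-- ===== SOURCE B (Python) =====
-- def get_pattern(word):
--     firsts = list(dict.fromkeys(word))
--     return ''.join(str(firsts.index(c)) for c in word)
--
--
-- def get_wordlists_pattern(words):
--     pats = [get_pattern(w) for w in words]
--     keys = list(dict.fromkeys(pats))
--     return {k: [w for p, w in zip(pats, words) if p == k] for k in keys}
-- ===== Notes on version B (the rewrite author's own statement) =====
-- stated objective: alternative
-- what changed: get_pattern is computed from the ordered-dedup list of the word's letters via index lookup instead of a counter+dict loop, and get_wordlists_pattern precomputes all patterns, collects the distinct patterns in first-seen order, and builds each group by a filter pass over the (pattern, word) pairs, instead of one-pass dict bucketing with insert-or-append.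
import Mathlib
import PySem

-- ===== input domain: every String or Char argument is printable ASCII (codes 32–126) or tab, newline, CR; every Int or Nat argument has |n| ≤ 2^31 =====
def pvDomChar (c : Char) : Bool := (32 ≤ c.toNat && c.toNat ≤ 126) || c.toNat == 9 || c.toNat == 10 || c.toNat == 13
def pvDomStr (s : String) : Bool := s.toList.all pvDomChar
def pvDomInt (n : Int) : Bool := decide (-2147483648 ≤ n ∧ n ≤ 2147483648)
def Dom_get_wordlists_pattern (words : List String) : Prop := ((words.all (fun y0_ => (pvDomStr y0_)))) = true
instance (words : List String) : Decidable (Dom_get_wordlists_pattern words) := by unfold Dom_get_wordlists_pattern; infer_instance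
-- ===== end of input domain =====

-- B groups words by pattern via ordered-dedup key collection + per-key filter passes instead of A's
-- one-pass dict bucketing (objective: alternative decomposition, same return value).

-- ===== PORT A =====

-- one iteration of A's get_pattern loop over (next_num, letter_nums, word_mask)
def patStepA (st : Int × PySem.Dict Char String × List String) (letter : Char) :
    Int × PySem.Dict Char String × List String :=
  let p :=
    if !(st.2.1.contains letter) then
      (st.1 + 1, st.2.1.insert letter (PySem.Int.toStr st.1))
    else (st.1, st.2.1)
  -- letter_nums[letter]: the key is always present here, so the "" default never shows
  (p.1, p.2, st.2.2 ++ [p.2.getD letter ""])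

def get_patternA (word : String) : String :=
  let st := word.toList.foldl patStepA ((0 : Int), PySem.Dict.empty, ([] : List String))
  PySem.Str.join "" st.2.2

-- one iteration of A's bucketing loop over all_masks
def bucketStep (d : PySem.Dict String (List String)) (word : String) :
    PySem.Dict String (List String) :=
  let mask := get_patternA word
  if !(d.contains mask) then d.insert mask [word]
  else d.modify mask [] (fun l => l ++ [word])

def get_wordlists_pattern (words : List String) : List (String × List String) :=
  let all_masks := words.foldl bucketStep PySem.Dict.empty
  all_masks.items

-- ===== PORT B =====

def get_patternB (word : String) : String :=
  let firsts := PySem.List.dedup word.toList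
  PySem.Str.join "" (word.toList.map (fun c =>
    PySem.Int.toStr (((PySem.List.index? firsts c).getD 0 : Nat) : Int)))

def get_wordlists_pattern_alt (words : List String) : List (String × List String) :=
  let pats := words.map get_patternB
  let keys := PySem.List.dedup pats
  keys.map (fun k =>
    (k, ((pats.zip words).filter (fun pw => pw.1 == k)).map (fun pw => pw.2)))

-- ===== PRECONDITION & SPEC =====
def Spec_get_wordlists_pattern (words : List String) (out : List (String × List String)) : Prop := out = get_wordlists_pattern_alt words
instance (words : List String) (out : List (String × List String)) : Decidable (Spec_get_wordlists_pattern words out) := by unfold Spec_get_wordlists_pattern; infer_instance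

-- ===== CLAIM (what is proved, stated in full; the proofs are below) =====
def Claim_equal_get_wordlists_pattern : Prop := ∀ (words : List String), Dom_get_wordlists_pattern words → Spec_get_wordlists_pattern words (get_wordlists_pattern words)

-- ===== LEMMAS AND PROOFS =====

-- the dict A's get_pattern loop has built after reading the prefix whose dedup is l
def patDict (l : List Char) : PySem.Dict Char String :=
  PySem.Dict.mk (l.zipIdx.map (fun ci => (ci.1, PySem.Int.toStr (ci.2 : Int))))

theorem keys_patDict (l : List Char) : (patDict l).keys = l := by
  simp [patDict, PySem.Dict.keys]
  exact List.zipIdx_map_fst 0 l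

theorem index_getD_eq_idxOf {l : List Char} {c : Char} (h : c ∈ l) :
    (PySem.List.index? l c).getD 0 = l.idxOf c := by
  obtain ⟨k, hk⟩ := Option.isSome_iff_exists.mp ((PySem.List.index?_isSome_iff l c).mpr h)
  have hk' : List.idxOf? c l = some k := by rw [← PySem.List.index?_eq_idxOf?]; exact hk
  rw [hk, List.idxOf_eq_getD_idxOf?, hk']
  rfl

theorem getD_patDict {l : List Char} {c : Char} (hl : l.Nodup) (h : c ∈ l) :
    (patDict l).getD c "" = PySem.Int.toStr ((l.idxOf c : Nat) : Int) := by
  apply PySem.Dict.getD_of_mem_items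
  · show (c, PySem.Int.toStr ((l.idxOf c : Nat) : Int)) ∈ l.zipIdx.map _
    refine List.mem_map.mpr ⟨(c, l.idxOf c), ?_, rfl⟩
    exact List.mem_zipIdx_iff_getElem?.mpr (by
      simp [List.getElem?_eq_getElem (List.idxOf_lt_length_of_mem h), List.getElem_idxOf])
  · rw [keys_patDict]; exact hl

theorem patDict_append (l : List Char) (c : Char) (h : c ∉ l) :
    (patDict l).insert c (PySem.Int.toStr ((l.length : Nat) : Int)) = patDict (l ++ [c]) := by
  have hc : (patDict l).contains c = false := by
    rw [PySem.Dict.contains_eq_decide_mem_keys, keys_patDict]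
    simp [h]
  apply PySem.Dict.ext
  rw [PySem.Dict.items_insert_of_not_contains _ _ hc]
  show _ ++ _ = (List.zipIdx (l ++ [c])).map _
  rw [List.zipIdx_append]
  simp [patDict]

theorem dedup_append_singleton {α : Type} [BEq α] [LawfulBEq α] [DecidableEq α]
    (p : List α) (c : α) :
    PySem.List.dedup (p ++ [c]) =
      if c ∈ p then PySem.List.dedup p else PySem.List.dedup p ++ [c] := by
  simp only [PySem.List.dedup_eq_ofList, PySem.Set.ofList_append_singleton, PySem.Set.add_eq_ite,
    PySem.Set.mem_ofList]

theorem patA_fold (p : List Char) :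
    p.foldl patStepA ((0 : Int), PySem.Dict.empty, ([] : List String)) =
      (((PySem.List.dedup p).length : Int), patDict (PySem.List.dedup p),
        p.map (fun c => PySem.Int.toStr (((PySem.List.dedup p).idxOf c : Nat) : Int))) := by
  induction p using List.reverseRecOn with
  | nil => rfl
  | append_singleton p c ih =>
    rw [List.foldl_append, ih, dedup_append_singleton]
    have hmemkeys : (patDict (PySem.List.dedup p)).contains c = decide (c ∈ p) := by
      rw [PySem.Dict.contains_eq_decide_mem_keys, keys_patDict]
      simp
    by_cases hc : c ∈ p
    · simp only [if_pos hc, List.map_append]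
      show patStepA _ c = _
      unfold patStepA
      rw [hmemkeys]
      simp only [hc, decide_true, Bool.not_true, Bool.false_eq_true, if_false, List.map_cons,
        List.map_nil]
      rw [getD_patDict (PySem.List.nodup_dedup p) ((PySem.List.mem_dedup p c).mpr hc)]
    · simp only [if_neg hc, List.map_append]
      show patStepA _ c = _
      unfold patStepA
      rw [hmemkeys]
      simp only [hc, decide_false, Bool.not_false, if_true, List.map_cons, List.map_nil]
      refine Prod.ext ?_ (Prod.ext ?_ ?_)
      · show ((PySem.List.dedup p).length : Int) + 1 = _
        simp
      · show (patDict (PySem.List.dedup p)).insert c _ = _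
        exact patDict_append _ _ (fun hm => hc ((PySem.List.mem_dedup p c).mp hm))
      · show _ ++ [((patDict (PySem.List.dedup p)).insert c _).getD c ""] = _
        rw [PySem.Dict.getD_insert_self]
        have hstable : ∀ x ∈ p,
            (PySem.List.dedup p ++ [c]).idxOf x = (PySem.List.dedup p).idxOf x := by
          intro x hx
          exact List.idxOf_append_of_mem ((PySem.List.mem_dedup p x).mpr hx)
        have hlast : (PySem.List.dedup p ++ [c]).idxOf c = (PySem.List.dedup p).length := by
          rw [List.idxOf_append, if_neg (fun hm => hc ((PySem.List.mem_dedup p c).mp hm)),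
            List.idxOf_cons_self]
          simp
        rw [hlast]
        congr 1
        exact List.map_congr_left (fun x hx => by rw [hstable x hx])

theorem pattern_eq (word : String) : get_patternA word = get_patternB word := by
  unfold get_patternA get_patternB
  rw [patA_fold]
  show PySem.Str.join "" (List.map _ word.toList) = PySem.Str.join "" (List.map _ word.toList)
  congr 1
  refine List.map_congr_left (fun c hc => ?_)
  have hm : c ∈ PySem.List.dedup word.toList := (PySem.List.mem_dedup _ c).mpr hc
  rw [index_getD_eq_idxOf hm]

-- the two branches of bucketStep, keyed by the contains test
theorem bucketStep_eq (d : PySem.Dict String (List String)) (w : String) :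
    bucketStep d w =
      if d.contains (get_patternA w) then d.modify (get_patternA w) [] (fun l => l ++ [w])
      else d.insert (get_patternA w) [w] := by
  unfold bucketStep
  by_cases h : d.contains (get_patternA w) <;> simp [h]

-- characterisation of A's bucketing loop: keys and contents
theorem bucket_keys (ws : List String) :
    (ws.foldl bucketStep PySem.Dict.empty).keys = PySem.List.dedup (ws.map get_patternA) := by
  induction ws using List.reverseRecOn with
  | nil => rfl
  | append_singleton ws w ih =>
    rw [List.foldl_append, List.foldl_cons, List.foldl_nil]
    simp only [List.map_append, List.map_cons, List.map_nil]
    rw [dedup_append_singleton, bucketStep_eq]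
    have hc : (List.foldl bucketStep PySem.Dict.empty ws).contains (get_patternA w)
        = decide (get_patternA w ∈ ws.map get_patternA) := by
      rw [PySem.Dict.contains_eq_decide_mem_keys, ih]
      simp
    rw [hc]
    by_cases hm : get_patternA w ∈ ws.map get_patternA
    · simp only [hm, decide_true, if_true]
      rw [PySem.Dict.keys_modify,
        PySem.Dict.keys_insert_of_contains _ _ (by rw [hc]; simp [hm]), ih]
    · simp only [hm, decide_false, Bool.false_eq_true, if_false]
      rw [PySem.Dict.keys_insert_of_not_contains _ _ (by rw [hc]; simp [hm]), ih]

theorem bucket_getD (ws : List String) (k : String) :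
    (ws.foldl bucketStep PySem.Dict.empty).getD k [] =
      ws.filter (fun w => get_patternA w == k) := by
  induction ws using List.reverseRecOn with
  | nil => rfl
  | append_singleton ws w ih =>
    rw [List.foldl_append, List.foldl_cons, List.foldl_nil, List.filter_append, bucketStep_eq]
    have hc : (List.foldl bucketStep PySem.Dict.empty ws).contains (get_patternA w)
        = decide (get_patternA w ∈ ws.map get_patternA) := by
      rw [PySem.Dict.contains_eq_decide_mem_keys, bucket_keys]
      simp
    rw [hc]
    by_cases hm : get_patternA w ∈ ws.map get_patternA
    · simp only [hm, decide_true, if_true]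
      rw [PySem.Dict.getD_modify]
      by_cases hk : k = get_patternA w
      · subst hk
        rw [if_pos rfl, ih]
        simp
      · rw [if_neg hk, ih]
        have hne : (get_patternA w == k) = false :=
          beq_eq_false_iff_ne.mpr (fun h => hk h.symm)
        simp [hne]
    · simp only [hm, decide_false, Bool.false_eq_true, if_false]
      rw [PySem.Dict.getD_insert]
      by_cases hk : k = get_patternA w
      · subst hk
        rw [if_pos rfl]
        have hnil : ws.filter (fun w' => get_patternA w' == get_patternA w) = [] :=
          List.filter_eq_nil_iff.mpr (fun w' hw' h =>
            hm ((beq_iff_eq.mp h) ▸ List.mem_map_of_mem hw'))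
        simp [hnil]
      · rw [if_neg hk, ih]
        have hne : (get_patternA w == k) = false :=
          beq_eq_false_iff_ne.mpr (fun h => hk h.symm)
        simp [hne]

-- filtering the (pattern, word) zip on the pattern component is filtering the words by pattern
theorem zip_filter_snd (ws : List String) (f : String → String) (k : String) :
    (((ws.map f).zip ws).filter (fun pw => pw.1 == k)).map (fun pw => pw.2) =
      ws.filter (fun w => f w == k) := by
  induction ws with
  | nil => rfl
  | cons w ws ih =>
    simp only [List.map_cons, List.zip_cons_cons, List.filter_cons]
    by_cases h : (f w == k) = true
    · simp only [h, if_true, List.map_cons, ih]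
    · simp only [h, Bool.false_eq_true, if_false, ih]

-- ===== VERDICT (by name: the statement is the Claim_ definition above) =====
theorem get_wordlists_pattern_spec : Claim_equal_get_wordlists_pattern := by
  intro words _
  unfold Spec_get_wordlists_pattern
  have hf : get_patternA = get_patternB := funext pattern_eq
  have hnd : (words.foldl bucketStep PySem.Dict.empty).keys.Nodup := by
    rw [bucket_keys]; exact PySem.List.nodup_dedup _
  show (words.foldl bucketStep PySem.Dict.empty).items =
    (PySem.List.dedup (words.map get_patternB)).map
      (fun k => (k, (((words.map get_patternB).zip words).filter
        (fun pw => pw.1 == k)).map (fun pw => pw.2)))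
  rw [PySem.Dict.items_eq_map_keys _ hnd ([] : List String), bucket_keys, ← hf]
  exact List.map_congr_left (fun k hk => by rw [bucket_getD, zip_filter_snd])
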